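-- pv_equiv track=rewrite | github.com/lsetiawan/ooi-indexing | models.py | _in_time_range
-- ===== SOURCE A (Python) =====
-- import bisect
-- from typing import Union
--
-- def _in_time_range(
--     time_filter: Union[list, tuple], time_range: Union[list, tuple]
-- ) -> bool:
--     """Checks whether the time filter is within the data time range"""
--     in_range_idx = 1
--     sorted_time_range = sorted(time_range)
--     in_range_list = [
--         bisect.bisect(sorted_time_range, t) for t in sorted(time_filter)
--     ]
--     return any(i for i in in_range_list if i == in_range_idx)
-- ===== SOURCE B (Python) =====
-- from typing import Union
--
--
-- def _in_time_range(
--     time_filter: Union[list, tuple], time_range: Union[list, tuple]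
-- ) -> bool:
--     """Checks whether the time filter is within the data time range"""
--     return any(
--         sum(1 for r in time_range if r <= t) == 1 for t in time_filter
--     )
-- ===== Notes on version B (the rewrite author's own statement) =====
-- stated objective: simpler
-- what changed: B drops both sorts and the bisect call: for each filter time it directly counts the range elements <= t in one scan and returns True if some count is exactly 1, which is precisely bisect_right(sorted(time_range), t) == 1.
import Mathlib
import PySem

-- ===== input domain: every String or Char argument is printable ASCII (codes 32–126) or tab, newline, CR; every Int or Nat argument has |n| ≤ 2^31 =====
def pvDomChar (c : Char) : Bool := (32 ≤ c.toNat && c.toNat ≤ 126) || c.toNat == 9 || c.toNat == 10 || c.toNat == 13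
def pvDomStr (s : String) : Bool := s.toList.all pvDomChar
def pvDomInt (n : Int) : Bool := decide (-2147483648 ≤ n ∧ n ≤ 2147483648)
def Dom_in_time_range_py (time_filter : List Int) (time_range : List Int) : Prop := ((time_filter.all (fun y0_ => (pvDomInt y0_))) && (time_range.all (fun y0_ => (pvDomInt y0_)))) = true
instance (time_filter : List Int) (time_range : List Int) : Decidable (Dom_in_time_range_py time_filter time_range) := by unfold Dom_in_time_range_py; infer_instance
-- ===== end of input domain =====

-- B drops the two sorts and the bisect: it counts, per filter time t, the range elements <= t and tests whether some count is exactly 1 (simpler; equal return value proved below).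


-- ===== PORT A =====
-- sorts time_range, bisects each element of sorted(time_filter), then `any(i for i in in_range_list if i == 1)`
def in_time_range_py (time_filter : List Int) (time_range : List Int) : Bool :=
  let in_range_idx : Int := 1
  let sorted_time_range := PySem.List.sorted time_range (fun x => x)
  let in_range_list : List Int :=
    (PySem.List.sorted time_filter (fun x => x)).map
      (fun t => (PySem.List.bisectRight sorted_time_range t : Int))
  -- any(i for i in in_range_list if i == 1): filter by i == 1, then truthiness of i
  (in_range_list.filter (fun i => i == in_range_idx)).any (fun i => i != 0)

-- ===== PORT B =====
-- no sorting: count range elements <= t by a direct scan, test count == 1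
def in_time_range_py_alt (time_filter : List Int) (time_range : List Int) : Bool :=
  time_filter.any (fun t => (time_range.countP (fun r => decide (r ≤ t)) : Int) == 1)

-- ===== PRECONDITION & SPEC =====
def Spec_in_time_range_py (time_filter : List Int) (time_range : List Int) (out : Bool) : Prop := out = in_time_range_py_alt time_filter time_range
instance (time_filter : List Int) (time_range : List Int) (out : Bool) : Decidable (Spec_in_time_range_py time_filter time_range out) := by unfold Spec_in_time_range_py; infer_instance

-- ===== CLAIM (what is proved, stated in full; the proofs are below) =====
def Claim_equal_in_time_range_py : Prop := ∀ (time_filter : List Int) (time_range : List Int), Dom_in_time_range_py time_filter time_range → Spec_in_time_range_py time_filter time_range (in_time_range_py time_filter time_range)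

-- ===== LEMMAS AND PROOFS =====

-- A list whose first k positions satisfy p and the rest do not has countP = k.
theorem countP_eq_of_split (p : Int → Bool) (xs : List Int) (k : Nat)
    (hk : k ≤ xs.length)
    (h1 : ∀ (j : Nat) (hj : j < xs.length), j < k → p xs[j])
    (h2 : ∀ (j : Nat) (hj : j < xs.length), k ≤ j → ¬ p xs[j]) :
    xs.countP p = k := by
  have hsplit := List.take_append_drop k xs
  have ha : (xs.take k).countP p = (xs.take k).length := by
    rw [List.countP_eq_length]
    intro a hmem
    obtain ⟨j, hj, rfl⟩ := List.mem_iff_getElem.1 hmem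
    have hj' : j < k := by
      have := List.length_take (l := xs) (i := k); omega
    have hjx : j < xs.length := lt_of_lt_of_le hj' hk
    have := h1 j hjx hj'
    simpa [List.getElem_take] using this
  have hb : (xs.drop k).countP p = 0 := by
    rw [List.countP_eq_zero]
    intro a hmem
    obtain ⟨j, hj, rfl⟩ := List.mem_iff_getElem.1 hmem
    have hjx : k + j < xs.length := by
      have := List.length_drop (l := xs) (i := k); omega
    have := h2 (k + j) hjx (by omega)
    simpa [List.getElem_drop] using this
  calc xs.countP p = ((xs.take k) ++ (xs.drop k)).countP p := by rw [hsplit]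
    _ = k := by
        rw [List.countP_append, ha, hb, List.length_take]
        omega

-- bisect_right on the sorted range computes the count of elements <= t in the original range.
theorem bisect_eq_countP (time_range : List Int) (t : Int) :
    PySem.List.bisectRight (PySem.List.sorted time_range (fun x => x)) t
      = time_range.countP (fun r => decide (r ≤ t)) := by
  set s := PySem.List.sorted time_range (fun x => x) with hs
  obtain ⟨hle, h1, h2⟩ := PySem.List.bisectRight_spec s t
    (by simpa [hs] using PySem.List.sorted_pairwise time_range (fun x => x))
  have hcs : s.countP (fun r => decide (r ≤ t)) = PySem.List.bisectRight s t := by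
    apply countP_eq_of_split _ _ _ hle
    · intro j hj hjk; simpa using h1 j hj hjk
    · intro j hj hjk; simpa using h2 j hj hjk
  rw [← hcs]
  exact (PySem.List.sorted_perm time_range (fun x => x) false).countP_eq _

-- ===== VERDICT (by name: the statement is the Claim_ definition above) =====
theorem in_time_range_py_spec : Claim_equal_in_time_range_py := by
  intro tf tr _
  unfold Spec_in_time_range_py in_time_range_py in_time_range_py_alt
  rw [List.any_filter, List.any_map]
  rw [(PySem.List.sorted_perm tf (fun x => x) false).any_eq]
  refine List.any_congr rfl (fun t => ?_)
  simp only [Function.comp]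
  rw [bisect_eq_countP]
  by_cases h : (tr.countP (fun r => decide (r ≤ t)) : Int) = 1 <;> simp [h]
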